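-- pv_equiv track=rewrite | github.com/Junghwamin/metacode-bootcamp | tests/test_solution_execution.py | patch_gui
-- ===== SOURCE A (Python) =====
-- def patch_gui(code):
--     """GUI 호출을 비활성화한다."""
--     if "matplotlib" in code or "plt" in code:
--         code = "import matplotlib\nmatplotlib.use('Agg')\n" + code
--     lines = code.split("\n")
--     out = []
--     for line in lines:
--         s = line.strip()
--         if s in ("fig.show()", "plt.show()"):
--             out.append(line.replace(s, "pass"))
--         else:
--             out.append(line)
--     return "\n".join(out)
-- ===== SOURCE B (Python) =====
-- import re
--
-- _SHOW = re.compile(r'^([^\S\n]*)(?:fig|plt)\.show\(\)([^\S\n]*)$', re.MULTILINE)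
--
--
-- def patch_gui(code):
--     """GUI 호출을 비활성화한다."""
--     if "matplotlib" in code or "plt" in code:
--         code = "import matplotlib\nmatplotlib.use('Agg')\n" + code
--     return _SHOW.sub(r'\1pass\2', code)
-- ===== Notes on version B (the rewrite author's own statement) =====
-- stated objective: idiomatic
-- what changed: Replaces A's split-into-lines loop with strip/tuple-membership/replace by a single precompiled re.sub over the whole string, using a MULTILINE-anchored pattern that rewrites whole fig.show()/plt.show() lines while keeping their surrounding whitespace via backreferences.
import Mathlib
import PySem

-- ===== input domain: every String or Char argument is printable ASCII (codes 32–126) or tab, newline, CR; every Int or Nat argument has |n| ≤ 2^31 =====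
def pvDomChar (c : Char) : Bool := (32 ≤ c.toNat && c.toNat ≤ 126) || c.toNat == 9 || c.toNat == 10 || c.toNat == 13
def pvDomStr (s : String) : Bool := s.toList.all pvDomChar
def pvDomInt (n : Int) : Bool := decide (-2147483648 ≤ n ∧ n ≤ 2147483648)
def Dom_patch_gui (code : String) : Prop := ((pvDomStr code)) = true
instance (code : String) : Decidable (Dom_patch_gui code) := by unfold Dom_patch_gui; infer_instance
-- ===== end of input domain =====

-- B replaces A's split/strip/replace/join line loop by one re.sub with a MULTILINE-anchored
-- pattern over the whole string (objective: idiomatic, same cost).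

-- ===== PORT A =====
-- per-line body of A's loop: s = line.strip(); if s in ("fig.show()","plt.show()"): line.replace(s,"pass")
def patch_gui_fixline (line : List Char) : List Char :=
  let s := PySem.Chars.strip line
  if s = "fig.show()".toList ∨ s = "plt.show()".toList then
    PySem.Chars.replace line s "pass".toList
  else line

def patch_gui_core (code0 : List Char) : List Char :=
  let code :=
    if PySem.Chars.isIn "matplotlib".toList code0 || PySem.Chars.isIn "plt".toList code0 then
      "import matplotlib\nmatplotlib.use('Agg')\n".toList ++ code0
    else code0
  let lines := PySem.Chars.splitOn code "\n".toList
  let out := lines.foldl (fun out line => out ++ [patch_gui_fixline line]) []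
  PySem.Chars.join "\n".toList out

def patch_gui (code : String) : String := String.ofList (patch_gui_core code.toList)

-- ===== PORT B =====
-- the character class [^\S\n] of Source B's pattern: regex whitespace except newline
-- (exact on the grader's ASCII domain, where \s-matching characters are space, tab, CR, LF)
def pvReWs (c : Char) : Bool := c == ' ' || c == '\t' || c == '\r' || c == '\x0b' || c == '\x0c'

-- hand port of one anchored match attempt of Source B's compiled pattern
-- r'^([^\S\n]*)(?:fig|plt)\.show\(\)([^\S\n]*)$' at a line start, `line` being the text up
-- to the next '\n' (where MULTILINE's $ matches).  Greedy [^\S\n]* never backtracks here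
-- because the alternation starts with the non-whitespace letters 'f'/'p', so takeWhile is
-- exact; the trailing [^\S\n]*$ is exact iff everything after the literal is [^\S\n].
def patch_gui_alt_match (line : List Char) : Option (List Char) :=
  let lead := line.takeWhile pvReWs
  let rest := line.drop lead.length
  if "fig.show()".toList.isPrefixOf rest ∨ "plt.show()".toList.isPrefixOf rest then
    let trail := rest.drop 10
    if trail.all pvReWs then some (lead ++ "pass".toList ++ trail) else none
  else none

-- hand port of _SHOW.sub(r'\1pass\2', code): scan the string, attempting the ^-anchored
-- match at every line start; on a match emit \1pass\2, otherwise copy the line verbatim.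
def patch_gui_alt_sub (cs : List Char) : List Char :=
  let out := match patch_gui_alt_match (cs.takeWhile (· ≠ '\n')) with
             | some repl => repl
             | none => cs.takeWhile (· ≠ '\n')
  if _h : cs.drop (cs.takeWhile (· ≠ '\n')).length = [] then out
  else out ++ '\n' :: patch_gui_alt_sub ((cs.drop (cs.takeWhile (· ≠ '\n')).length).tail)
termination_by cs.length
decreasing_by
  have h1 : (cs.takeWhile (· ≠ '\n')).length ≤ cs.length :=
    (List.takeWhile_sublist _).length_le
  have h3 : 0 < (cs.drop (cs.takeWhile (· ≠ '\n')).length).length :=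
    List.length_pos_iff.mpr _h
  simp only [List.length_tail, List.length_drop] at *
  omega

def patch_gui_alt (code : String) : String :=
  String.ofList
    (let code :=
      if PySem.Chars.isIn "matplotlib".toList code.toList
          || PySem.Chars.isIn "plt".toList code.toList then
        "import matplotlib\nmatplotlib.use('Agg')\n".toList ++ code.toList
      else code.toList
     patch_gui_alt_sub code)

-- ===== PRECONDITION & SPEC =====
def Spec_patch_gui (code : String) (out : String) : Prop := out = patch_gui_alt code
instance (code : String) (out : String) : Decidable (Spec_patch_gui code out) := by unfold Spec_patch_gui; infer_instance

-- ===== CLAIM (what is proved, stated in full; the proofs are below) =====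
def Claim_equal_patch_gui : Prop := ∀ (code : String), Dom_patch_gui code → Spec_patch_gui code (patch_gui code)

-- ===== LEMMAS AND PROOFS =====

-- lines of a character list, split at '\n' (reference shape shared by both proofs)
def pvLines : List Char → List (List Char)
  | [] => [[]]
  | c :: cs => if c = '\n' then [] :: pvLines cs else (pvLines cs).modifyHead (c :: ·)

theorem pvLines_ne_nil (cs : List Char) : pvLines cs ≠ [] := by
  induction cs with
  | nil => simp [pvLines]
  | cons c cs ih =>
    simp only [pvLines]
    split
    · simp
    · cases h : pvLines cs with
      | nil => exact absurd h ih
      | cons a t => simp [h, List.modifyHead]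

theorem pvLines_cons_nl (cs : List Char) : pvLines ('\n' :: cs) = [] :: pvLines cs := by
  rw [pvLines]; simp

theorem pvLines_cons_other (c : Char) (cs : List Char) (hc : c ≠ '\n') :
    pvLines (c :: cs) = (pvLines cs).modifyHead (c :: ·) := by
  rw [pvLines]; simp [hc]

theorem pvCharToNatInj {c d : Char} (h : c.toNat = d.toNat) : c = d :=
  Char.ext (UInt32.toNat_inj.mp h)

theorem pv_splitOn_go (fuel : ℕ) (l cur : List Char) (acc : List (List Char))
    (h : l.length ≤ fuel) :
    PySem.Chars.splitOn.go ['\n'] fuel l cur acc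
      = acc.reverse ++ (pvLines l).modifyHead (cur.reverse ++ ·) := by
  induction fuel generalizing l cur acc with
  | zero =>
    have : l = [] := List.length_eq_zero_iff.mp (Nat.le_zero.mp h)
    subst this
    rw [PySem.Chars.splitOn.go]
    simp [pvLines, List.modifyHead]
  | succ f ih =>
    cases l with
    | nil =>
      rw [PySem.Chars.splitOn.go]
      simp [pvLines, List.modifyHead]
      omega
    | cons c rest =>
      rw [PySem.Chars.splitOn.go]
      by_cases hc : c = '\n'
      · subst hc
        have hp : (['\n'].isPrefixOf ('\n' :: rest)) = true := by simp [List.isPrefixOf]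
        simp only [hp, if_pos]
        rw [show List.drop (['\n'] : List Char).length ('\n' :: rest) = rest from rfl]
        rw [ih rest [] (cur.reverse :: acc) (by simpa using Nat.lt_succ_iff.mp (by simpa using h))]
        simp [pvLines, List.modifyHead]
        cases h2 : pvLines rest with
        | nil => exact absurd h2 (pvLines_ne_nil rest)
        | cons a t => simp [List.modifyHead]
      · have hp : (['\n'].isPrefixOf (c :: rest)) = false := by
          simp [List.isPrefixOf]
          exact fun hh => absurd hh.symm hc
        simp only [hp, Bool.false_eq_true, if_false]
        rw [ih rest (c :: cur) acc (by simpa using Nat.lt_succ_iff.mp (by simpa using h))]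
        cases h2 : pvLines rest with
        | nil => exact absurd h2 (pvLines_ne_nil rest)
        | cons a t => simp [pvLines, hc, h2, List.modifyHead]

theorem pv_splitOn_eq (cs : List Char) :
    PySem.Chars.splitOn cs "\n".toList = pvLines cs := by
  rw [show "\n".toList = ['\n'] from rfl, PySem.Chars.splitOn.eq_1]
  rw [pv_splitOn_go (cs.length + 1) cs [] [] (Nat.le_succ _)]
  cases h2 : pvLines cs with
  | nil => exact absurd h2 (pvLines_ne_nil cs)
  | cons a t => simp [List.modifyHead]

theorem pvLines_mem (cs l : List Char) (hl : l ∈ pvLines cs) :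
    ∀ c ∈ l, c ∈ cs ∧ c ≠ '\n' := by
  induction cs generalizing l with
  | nil =>
    rw [pvLines] at hl
    simp only [List.mem_singleton] at hl
    subst hl
    simp
  | cons a cs ih =>
    by_cases ha : a = '\n'
    · subst ha
      rw [pvLines_cons_nl] at hl
      rcases List.mem_cons.mp hl with h | h
      · subst h; simp
      · intro c hc
        rcases ih l h c hc with ⟨h1, h2⟩
        exact ⟨List.mem_cons_of_mem _ h1, h2⟩
    · rw [pvLines_cons_other a cs ha] at hl
      cases h2 : pvLines cs with
      | nil => exact absurd h2 (pvLines_ne_nil cs)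
      | cons b t =>
        rw [h2, List.modifyHead] at hl
        rcases List.mem_cons.mp hl with h | h
        · subst h
          intro c hc
          rcases List.mem_cons.mp hc with h | h
          · subst h; exact ⟨List.mem_cons_self, ha⟩
          · rcases ih b (by simp [h2]) c h with ⟨h1', h2'⟩
            exact ⟨List.mem_cons_of_mem _ h1', h2'⟩
        · intro c hc
          rcases ih l (by simp [h2, h]) c hc with ⟨h1', h2'⟩
          exact ⟨List.mem_cons_of_mem _ h1', h2'⟩

theorem pvLines_no_nl (l : List Char) (h : '\n' ∉ l) : pvLines l = [l] := by
  induction l with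
  | nil => rfl
  | cons c cs ih =>
    have hc : c ≠ '\n' := fun hh => h (hh ▸ List.mem_cons_self)
    rw [pvLines_cons_other c cs hc, ih (fun hh => h (List.mem_cons_of_mem _ hh))]
    rfl

theorem pvLines_append_nl (b r : List Char) (h : '\n' ∉ b) :
    pvLines (b ++ '\n' :: r) = b :: pvLines r := by
  induction b with
  | nil => simp [pvLines]
  | cons c cs ih =>
    have hc : c ≠ '\n' := fun hh => h (hh ▸ List.mem_cons_self)
    rw [List.cons_append, pvLines_cons_other c _ hc, ih (fun hh => h (List.mem_cons_of_mem _ hh))]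
    rfl

-- B's per-line result, as an expression
def pvFixB (line : List Char) : List Char :=
  match patch_gui_alt_match line with
  | some repl => repl
  | none => line

-- B's sub-scan, one line at a time
theorem pv_sub_no_nl (cs : List Char) (h : '\n' ∉ cs) :
    patch_gui_alt_sub cs = pvFixB cs := by
  have htake : cs.takeWhile (· ≠ '\n') = cs :=
    List.takeWhile_eq_self_iff.mpr (fun c hc => by
      simp only [ne_eq, decide_eq_true_eq]
      exact fun hh => h (hh ▸ hc))
  conv_lhs => rw [patch_gui_alt_sub.eq_def]
  simp only [htake, List.drop_length]
  rw [dif_pos trivial]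
  rfl

theorem pv_sub_step (b r : List Char) (hb : '\n' ∉ b) :
    patch_gui_alt_sub (b ++ '\n' :: r) = pvFixB b ++ '\n' :: patch_gui_alt_sub r := by
  have hself : b.takeWhile (· ≠ '\n') = b :=
    List.takeWhile_eq_self_iff.mpr (fun c hc => by
      simp only [ne_eq, decide_eq_true_eq]
      exact fun hh => hb (hh ▸ hc))
  have htake : (b ++ '\n' :: r).takeWhile (· ≠ '\n') = b := by
    rw [List.takeWhile_append]
    rw [if_pos (by rw [hself])]
    simp [hself]
  have hdrop : (b ++ '\n' :: r).drop b.length = '\n' :: r := by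
    simp [List.drop_left]
  conv_lhs => rw [patch_gui_alt_sub.eq_def]
  simp only [htake, hdrop, List.tail_cons]
  rw [dif_neg (by simp)]
  rfl

theorem pv_sub_eq (cs : List Char) :
    patch_gui_alt_sub cs = PySem.Chars.join "\n".toList ((pvLines cs).map pvFixB) := by
  induction hn : cs.length using Nat.strong_induction_on generalizing cs with
  | _ n ih =>
  subst hn
  by_cases hnl : '\n' ∈ cs
  · obtain ⟨b, r, hb, hcs⟩ :
        ∃ b r, '\n' ∉ b ∧ cs = b ++ '\n' :: r := by
      have hsplit := (List.takeWhile_append_dropWhile (p := (· ≠ '\n')) (l := cs)).symm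
      have hne : cs.dropWhile (· ≠ '\n') ≠ [] := by
        intro h0
        have := List.dropWhile_eq_nil_iff.mp h0 '\n' hnl
        simp at this
      refine ⟨cs.takeWhile (· ≠ '\n'), (cs.dropWhile (· ≠ '\n')).tail, ?_, ?_⟩
      · intro h
        have := List.mem_takeWhile_imp h
        simp at this
      · conv_lhs => rw [hsplit]
        congr 1
        have hx := List.head_dropWhile_not (p := (· ≠ '\n')) (l := cs) hne
        cases hdd : cs.dropWhile (· ≠ '\n') with
        | nil => exact absurd hdd hne
        | cons x t =>
          simp only [hdd, List.head_cons] at hx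
          simp at hx
          simp [hdd, hx]
    subst hcs
    rw [pv_sub_step b r hb, ih r.length (by simp; omega) r rfl, pvLines_append_nl b r hb]
    rw [List.map_cons]
    cases h2 : pvLines r with
    | nil => exact absurd h2 (pvLines_ne_nil r)
    | cons a t =>
      rw [List.map_cons, PySem.Chars.join_cons_cons, ← List.map_cons, ← h2]
      simp
  · rw [pv_sub_no_nl cs hnl, pvLines_no_nl cs hnl]
    simp [PySem.Chars.join_singleton]

theorem pv_dropWhile_congr (p q : Char → Bool) (l : List Char) (h : ∀ c ∈ l, p c = q c) :
    l.dropWhile p = l.dropWhile q := by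
  induction l with
  | nil => rfl
  | cons c cs ih =>
    rw [List.dropWhile_cons, List.dropWhile_cons, h c List.mem_cons_self]
    split
    · exact ih (fun c hc => h c (List.mem_cons_of_mem _ hc))
    · rfl

theorem pv_ws_eq (c : Char) (hd : pvDomChar c = true) (hn : c ≠ '\n') :
    PySem.Chars.isspace c = pvReWs c := by
  have e0 : ∀ d : Char, (c == d) = decide (c.toNat = d.toNat) := by
    intro d
    by_cases hh : c = d
    · subst hh; simp
    · rw [beq_eq_false_iff_ne.mpr hh, decide_eq_false (fun hx => hh (pvCharToNatInj hx))]
  have hn' : c.toNat ≠ 10 := fun hh => hn (pvCharToNatInj (by simpa using hh))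
  simp only [pvDomChar, Bool.or_eq_true, Bool.and_eq_true, decide_eq_true_eq, beq_iff_eq] at hd
  simp only [PySem.Chars.isspace, pvReWs, e0]
  show (decide (c.toNat = 32) || decide (9 ≤ c.toNat) && decide (c.toNat ≤ 13) ||
      decide (28 ≤ c.toNat) && decide (c.toNat ≤ 31) || decide (c.toNat = 133) ||
      decide (c.toNat = 160) || decide (c.toNat = 5760) ||
      decide (8192 ≤ c.toNat) && decide (c.toNat ≤ 8202) || decide (c.toNat = 8232) ||
      decide (c.toNat = 8233) || decide (c.toNat = 8239) || decide (c.toNat = 8287) ||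
      decide (c.toNat = 12288))
    = (decide (c.toNat = ' '.toNat) || decide (c.toNat = '\t'.toNat) || decide (c.toNat = '\r'.toNat)
       || decide (c.toNat = '\x0b'.toNat) || decide (c.toNat = '\x0c'.toNat))
  rw [show (' '.toNat = 32) from rfl, show ('\t'.toNat = 9) from rfl,
    show ('\r'.toNat = 13) from rfl, show ('\x0b'.toNat = 11) from rfl,
    show ('\x0c'.toNat = 12) from rfl]
  rw [Bool.eq_iff_iff]
  simp only [Bool.or_eq_true, Bool.and_eq_true, decide_eq_true_eq]
  generalize c.toNat = n at hd hn' ⊢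
  rcases hd with ⟨h1, h2⟩ | h | h | h <;> constructor <;> intro hx <;> omega

-- A's line.replace(core, "pass") on a line of shape lead ++ core ++ trail (lead/trail whitespace,
-- core starting with a non-whitespace character) rebuilds lead ++ "pass" ++ trail.
theorem pv_replace_go_trail (hc : Char) (tk new : List Char) (hh : pvReWs hc = false)
    (fuel : ℕ) (trail acc : List Char) (hf : trail.length ≤ fuel)
    (ht : ∀ c ∈ trail, pvReWs c = true) :
    PySem.Chars.replace.go (hc :: tk) new fuel trail acc = acc.reverse ++ trail := by
  induction fuel generalizing trail acc with
  | zero =>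
    have : trail = [] := List.length_eq_zero_iff.mp (Nat.le_zero.mp hf)
    subst this
    rw [PySem.Chars.replace.go]
  | succ f ih =>
    cases trail with
    | nil =>
      rw [PySem.Chars.replace.go]
      simp
      omega
    | cons c t =>
      have hne : ((hc :: tk).isPrefixOf (c :: t)) = false := by
        simp only [List.isPrefixOf, Bool.and_eq_false_iff]
        left
        simp only [beq_eq_false_iff_ne, ne_eq]
        intro hhh
        rw [hhh, ht c List.mem_cons_self] at hh
        simp at hh
      rw [PySem.Chars.replace.go]
      simp only [hne, Bool.false_eq_true, if_false]
      rw [ih t (c :: acc) (by simpa using Nat.lt_succ_iff.mp (by simpa using hf))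
        (fun c hcmem => ht c (List.mem_cons_of_mem _ hcmem))]
      simp

theorem pv_replace_go_main (hc : Char) (tk new : List Char) (hh : pvReWs hc = false)
    (fuel : ℕ) (lead trail acc : List Char)
    (hf : lead.length + 1 + trail.length ≤ fuel)
    (hl : ∀ c ∈ lead, pvReWs c = true) (ht : ∀ c ∈ trail, pvReWs c = true) :
    PySem.Chars.replace.go (hc :: tk) new fuel (lead ++ (hc :: tk) ++ trail) acc
      = acc.reverse ++ lead ++ new ++ trail := by
  induction lead generalizing fuel acc with
  | nil =>
    cases fuel with
    | zero => omega
    | succ f =>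
      rw [show (([] : List Char) ++ (hc :: tk) ++ trail) = hc :: (tk ++ trail) by simp]
      rw [PySem.Chars.replace.go]
      have hp : ((hc :: tk).isPrefixOf (hc :: (tk ++ trail))) = true :=
        List.isPrefixOf_iff_prefix.mpr ⟨trail, by simp⟩
      simp only [hp, if_pos]
      rw [show List.drop (hc :: tk).length (hc :: (tk ++ trail)) = trail by simp]
      rw [pv_replace_go_trail hc tk new hh f trail (new.reverse ++ acc)
        (by simp at hf; omega) ht]
      simp
  | cons a lead ih =>
    cases fuel with
    | zero => simp at hf
    | succ f =>
      have ha : pvReWs a = true := hl a List.mem_cons_self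
      have hne : ((hc :: tk).isPrefixOf (a :: (lead ++ (hc :: tk) ++ trail))) = false := by
        simp only [List.isPrefixOf, Bool.and_eq_false_iff]
        left
        simp only [beq_eq_false_iff_ne, ne_eq]
        intro hhh; rw [hhh, ha] at hh; simp at hh
      rw [show ((a :: lead) ++ (hc :: tk) ++ trail : List Char)
            = a :: (lead ++ (hc :: tk) ++ trail) by simp]
      rw [PySem.Chars.replace.go]
      simp only [hne, Bool.false_eq_true, if_false]
      rw [ih f (a :: acc) (by simp at hf ⊢; omega)
        (fun c hcm => hl c (List.mem_cons_of_mem _ hcm))]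
      simp

-- on a domain line without '\n', A's strip-compare-replace equals B's anchored regex match
theorem pv_fix_eq (line : List Char) (hd : ∀ c ∈ line, pvDomChar c = true)
    (hn : '\n' ∉ line) : patch_gui_fixline line = pvFixB line := by
  have hws : ∀ c ∈ line, PySem.Chars.isspace c = pvReWs c := fun c hc =>
    pv_ws_eq c (hd c hc) (fun hh => hn (hh ▸ hc))
  set lead := line.takeWhile pvReWs with hlead
  have hrest : line.drop lead.length = line.dropWhile pvReWs := by
    conv_lhs => rw [← List.takeWhile_append_dropWhile (p := pvReWs) (l := line)]
    rw [← hlead, List.drop_left]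
  set rest := line.dropWhile pvReWs with hrestdef
  have hrmem : ∀ c ∈ rest, c ∈ line := fun c hc =>
    (List.dropWhile_sublist (p := pvReWs) (l := line)).mem hc
  have hleadws : ∀ c ∈ lead, pvReWs c = true := fun c hc => List.mem_takeWhile_imp hc
  have hlinesplit : line = lead ++ rest := by
    rw [hlead, hrestdef]
    exact (List.takeWhile_append_dropWhile (p := pvReWs) (l := line)).symm
  -- A's strip equals the rstrip of rest
  have hstrip : PySem.Chars.strip line = (rest.reverse.dropWhile pvReWs).reverse := by
    unfold PySem.Chars.strip PySem.Chars.lstrip PySem.Chars.rstrip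
    rw [pv_dropWhile_congr _ pvReWs line hws, ← hrestdef]
    congr 1
    exact pv_dropWhile_congr _ pvReWs rest.reverse
      (fun c hc => hws c (hrmem c (by simpa using hc)))
  rw [patch_gui_fixline, pvFixB, patch_gui_alt_match]
  simp only [← hlead, hrest, hstrip]
  by_cases hpre : ("fig.show()".toList.isPrefixOf rest ∨ "plt.show()".toList.isPrefixOf rest)
  · -- rest = token ++ trail
    have hdec : ∃ tok : List Char,
        (tok = "fig.show()".toList ∨ tok = "plt.show()".toList) ∧ rest = tok ++ rest.drop 10 := by
      rcases hpre with h | h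
      · refine ⟨"fig.show()".toList, Or.inl rfl, ?_⟩
        rcases List.isPrefixOf_iff_prefix.mp h with ⟨t, ht⟩
        rw [← ht, show (10 : ℕ) = ("fig.show()".toList : List Char).length from rfl,
          List.drop_left]
      · refine ⟨"plt.show()".toList, Or.inr rfl, ?_⟩
        rcases List.isPrefixOf_iff_prefix.mp h with ⟨t, ht⟩
        rw [← ht, show (10 : ℕ) = ("plt.show()".toList : List Char).length from rfl,
          List.drop_left]
    obtain ⟨tok, htok, hsplit⟩ := hdec
    set trail := rest.drop 10 with htrdef
    simp only [if_pos hpre]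
    by_cases htr : trail.all pvReWs
    · -- match succeeds; A's strip is exactly tok
      have htrws : ∀ c ∈ trail, pvReWs c = true := List.all_eq_true.mp htr
      have hstr2 : (rest.reverse.dropWhile pvReWs).reverse = tok := by
        rw [hsplit, List.reverse_append, List.dropWhile_append]
        have h1 : trail.reverse.dropWhile pvReWs = [] :=
          List.dropWhile_eq_nil_iff.mpr (fun c hc => htrws c (by simpa using hc))
        rw [h1]
        simp only [List.isEmpty_nil, if_pos]
        have h2 : tok.reverse.dropWhile pvReWs = tok.reverse := by
          rcases htok with h | h <;> subst h <;> decide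
        rw [h2, List.reverse_reverse]
      rw [hstr2, if_pos (by rcases htok with h | h <;> subst h <;> simp), htr, if_pos rfl]
      have hdecomp : line = lead ++ tok ++ trail := by
        rw [hlinesplit, hsplit]; simp
      rcases htok with h | h <;> subst h
      · rw [hdecomp, PySem.Chars.replace, if_neg (by decide)]
        rw [show ("fig.show()".toList : List Char) = 'f' :: "ig.show()".toList from rfl]
        rw [pv_replace_go_main 'f' "ig.show()".toList "pass".toList (by decide) _ lead trail []
          (by simp; omega) hleadws htrws]
        simp
      · rw [hdecomp, PySem.Chars.replace, if_neg (by decide)]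
        rw [show ("plt.show()".toList : List Char) = 'p' :: "lt.show()".toList from rfl]
        rw [pv_replace_go_main 'p' "lt.show()".toList "pass".toList (by decide) _ lead trail []
          (by simp; omega) hleadws htrws]
        simp
    · -- trail has a non-ws char: A's strip is longer than tok, no match either side
      simp only [Bool.not_eq_true] at htr
      rw [htr]
      simp only [Bool.false_eq_true, if_false]
      -- show strip line ∉ tokens
      rw [if_neg]
      intro hcon
      -- strip line = tok' means rest = tok' ++ ws-trail with all ws, so trail all ws
      have hws2 : ∀ c ∈ rest.reverse.takeWhile pvReWs, pvReWs c = true :=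
        fun c hc => List.mem_takeWhile_imp hc
      have hrsplit : rest = (rest.reverse.dropWhile pvReWs).reverse
          ++ (rest.reverse.takeWhile pvReWs).reverse := by
        conv_lhs => rw [← List.reverse_reverse rest]
        conv_lhs => rw [← List.takeWhile_append_dropWhile (p := pvReWs) (l := rest.reverse)]
        rw [List.reverse_append]
      have key : ((rest.reverse.dropWhile pvReWs).reverse : List Char).length = 10 → False := by
        intro hlen
        have htreq : trail = (rest.reverse.takeWhile pvReWs).reverse := by
          rw [htrdef]
          conv_lhs => rw [hrsplit]
          rw [show (10 : ℕ) = ((rest.reverse.dropWhile pvReWs).reverse : List Char).length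
            from hlen.symm]
          rw [List.drop_left]
        have hall : trail.all pvReWs = true := List.all_eq_true.mpr (fun c hc => hws2 c (by
          rw [htreq] at hc; simpa using hc))
        rw [htr] at hall
        exact Bool.false_ne_true hall
      rcases hcon with h | h
      · exact key (by rw [h]; rfl)
      · exact key (by rw [h]; rfl)
  · -- no token prefix: A's strip cannot be a token either
    simp only [if_neg hpre]
    rw [if_neg]
    intro hcon
    apply hpre
    have hrsplit : rest = (rest.reverse.dropWhile pvReWs).reverse
        ++ (rest.reverse.takeWhile pvReWs).reverse := by
      conv_lhs => rw [← List.reverse_reverse rest]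
      conv_lhs => rw [← List.takeWhile_append_dropWhile (p := pvReWs) (l := rest.reverse)]
      rw [List.reverse_append]
    rcases hcon with h | h
    · left
      rw [h] at hrsplit
      exact List.isPrefixOf_iff_prefix.mpr ⟨_, hrsplit.symm⟩
    · right
      rw [h] at hrsplit
      exact List.isPrefixOf_iff_prefix.mpr ⟨_, hrsplit.symm⟩

theorem pv_core_eq (cs : List Char) (hd : ∀ c ∈ cs, pvDomChar c = true) :
    patch_gui_core cs
      = (let code :=
          if PySem.Chars.isIn "matplotlib".toList cs || PySem.Chars.isIn "plt".toList cs then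
            "import matplotlib\nmatplotlib.use('Agg')\n".toList ++ cs
          else cs
         patch_gui_alt_sub code) := by
  rw [patch_gui_core]
  set code := if PySem.Chars.isIn "matplotlib".toList cs || PySem.Chars.isIn "plt".toList cs then
      "import matplotlib\nmatplotlib.use('Agg')\n".toList ++ cs
    else cs with hcode
  have hdc : ∀ c ∈ code, pvDomChar c = true := by
    rw [hcode]
    have hshim0 : ("import matplotlib\nmatplotlib.use('Agg')\n".toList).all pvDomChar = true := by
      decide
    have hshim : ∀ x ∈ ("import matplotlib\nmatplotlib.use('Agg')\n".toList), pvDomChar x = true :=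
      List.all_eq_true.mp hshim0
    split
    · intro c hc
      rcases List.mem_append.mp hc with h | h
      · exact hshim c h
      · exact hd c h
    · exact hd
  rw [pv_sub_eq code, pv_splitOn_eq, PySem.List.foldl_append_singleton_eq_map]
  simp only [List.nil_append]
  congr 1
  apply List.map_congr_left
  intro l hl
  have := pvLines_mem code l hl
  exact pv_fix_eq l (fun c hc => hdc c (this c hc).1) (fun hc => (this '\n' hc).2 rfl)

-- ===== VERDICT (by name: the statement is the Claim_ definition above) =====
theorem patch_gui_spec : Claim_equal_patch_gui := by
  intro code hdom
  unfold Spec_patch_gui patch_gui patch_gui_alt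
  have hd : ∀ c ∈ code.toList, pvDomChar c = true := by
    intro c hc
    exact List.all_eq_true.mp hdom c hc
  rw [pv_core_eq code.toList hd]
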